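-- pv_equiv track=rewrite | github.com/jialuli-luka/Debate_Persuation_Argument_Structure | src/language_features.py | person_count
-- ===== SOURCE A (Python) =====
-- def person_count(text):
--     '''
--     counts first, person, third pronouns in a tokenized word list.
--     '''
--     first_count = 0
--     second_count = 0
--     third_count = 0
--     for token in text:
--         if token.lower() == "i" or token.lower() == "us" or token.lower() == "my" or token.lower() == "mine" or token.lower() == "we" or token.lower() == "our" or token.lower() == "us" or token.lower() == "myself" or token.lower() == "ourselves" or token.lower() == "me":
--             first_count += 1
--         if token.lower() == "you" or token.lower() == "yours" or token.lower() == "your" or token.lower() == "yourself" or token.lower() == "yourselves":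
--             second_count += 1
--         if token.lower() == "he" or token.lower() == "she" or token.lower() == "his" or token.lower() == "her" or token.lower() == "hers" or token.lower() == "they" or token.lower() == "them" or token.lower() == "him" or token.lower() == "himself" or token.lower() == "herself" or token.lower() == "themselves":
--             third_count += 1
--     return [first_count, second_count, third_count]
-- ===== SOURCE B (Python) =====
-- FIRST = ("i", "us", "my", "mine", "we", "our", "myself", "ourselves", "me")
-- SECOND = ("you", "yours", "your", "yourself", "yourselves")
-- THIRD = ("he", "she", "his", "her", "hers", "they", "them", "him",
--          "himself", "herself", "themselves")
--
--
-- def person_count(text):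
--     '''
--     counts first, second, third person pronouns in a tokenized word list.
--     '''
--     freq = {}
--     for token in text:
--         w = token.lower()
--         freq[w] = freq.get(w, 0) + 1
--     return [sum(freq.get(w, 0) for w in group) for group in (FIRST, SECOND, THIRD)]
-- ===== Notes on version B (the rewrite author's own statement) =====
-- stated objective: idiomatic
-- what changed: A tests each token against three long or-chains inside one scan with three counters; B builds a frequency table of lowered tokens once, then computes each category by summing the table's counts over a fixed pronoun tuple.
import Mathlib
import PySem

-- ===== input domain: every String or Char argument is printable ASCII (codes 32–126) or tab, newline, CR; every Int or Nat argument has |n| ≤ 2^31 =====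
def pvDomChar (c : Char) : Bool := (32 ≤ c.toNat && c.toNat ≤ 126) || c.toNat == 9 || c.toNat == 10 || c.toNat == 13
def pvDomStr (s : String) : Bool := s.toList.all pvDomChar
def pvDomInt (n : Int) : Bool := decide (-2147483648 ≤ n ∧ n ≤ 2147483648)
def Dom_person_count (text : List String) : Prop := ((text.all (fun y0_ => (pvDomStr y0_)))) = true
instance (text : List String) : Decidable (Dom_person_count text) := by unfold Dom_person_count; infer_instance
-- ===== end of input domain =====

-- B replaces A's single scan with three or-chain branches by a frequency table of
-- lowered tokens plus, per category, a sum of the table's counts over a fixed pronoun list (idiomatic).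

-- ===== PORT A =====
def person_count (text : List String) : List Int :=
  let r := text.foldl (fun (acc : Int × Int × Int) token =>
    let first_count :=
      if PySem.Str.lower token == "i" || PySem.Str.lower token == "us" ||
         PySem.Str.lower token == "my" || PySem.Str.lower token == "mine" ||
         PySem.Str.lower token == "we" || PySem.Str.lower token == "our" ||
         PySem.Str.lower token == "us" || PySem.Str.lower token == "myself" ||
         PySem.Str.lower token == "ourselves" || PySem.Str.lower token == "me"
      then acc.1 + 1 else acc.1
    let second_count :=
      if PySem.Str.lower token == "you" || PySem.Str.lower token == "yours" ||
         PySem.Str.lower token == "your" || PySem.Str.lower token == "yourself" ||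
         PySem.Str.lower token == "yourselves"
      then acc.2.1 + 1 else acc.2.1
    let third_count :=
      if PySem.Str.lower token == "he" || PySem.Str.lower token == "she" ||
         PySem.Str.lower token == "his" || PySem.Str.lower token == "her" ||
         PySem.Str.lower token == "hers" || PySem.Str.lower token == "they" ||
         PySem.Str.lower token == "them" || PySem.Str.lower token == "him" ||
         PySem.Str.lower token == "himself" || PySem.Str.lower token == "herself" ||
         PySem.Str.lower token == "themselves"
      then acc.2.2 + 1 else acc.2.2
    (first_count, second_count, third_count)) (0, 0, 0)
  [r.1, r.2.1, r.2.2]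

-- ===== PORT B =====
def pvFIRST : List String := ["i", "us", "my", "mine", "we", "our", "myself", "ourselves", "me"]
def pvSECOND : List String := ["you", "yours", "your", "yourself", "yourselves"]
def pvTHIRD : List String := ["he", "she", "his", "her", "hers", "they", "them", "him", "himself", "herself", "themselves"]

def person_count_alt (text : List String) : List Int :=
  let freq := text.foldl (fun (d : PySem.Dict String Int) token =>
      let w := PySem.Str.lower token
      d.insert w (d.getD w 0 + 1)) PySem.Dict.empty
  [pvFIRST, pvSECOND, pvTHIRD].map (fun group => (group.map (fun w => freq.getD w 0)).sum)

-- ===== PRECONDITION & SPEC =====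
def Spec_person_count (text : List String) (out : List Int) : Prop := out = person_count_alt text
instance (text : List String) (out : List Int) : Decidable (Spec_person_count text out) := by unfold Spec_person_count; infer_instance

-- ===== CLAIM (what is proved, stated in full; the proofs are below) =====
def Claim_equal_person_count : Prop := ∀ (text : List String), Dom_person_count text → Spec_person_count text (person_count text)

-- ===== LEMMAS AND PROOFS =====

-- number of tokens whose lowering lies in G
def pvN (G text : List String) : Int :=
  ((text.map PySem.Str.lower).countP (fun w => decide (w ∈ G)) : Nat)

theorem pv_cond_first (w : String) :
    (w == "i" || w == "us" || w == "my" || w == "mine" || w == "we" || w == "our" ||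
     w == "us" || w == "myself" || w == "ourselves" || w == "me")
      = decide (w ∈ pvFIRST) := by
  rw [Bool.eq_iff_iff]; simp [pvFIRST]; tauto

theorem pv_cond_second (w : String) :
    (w == "you" || w == "yours" || w == "your" || w == "yourself" || w == "yourselves")
      = decide (w ∈ pvSECOND) := by
  rw [Bool.eq_iff_iff]; simp [pvSECOND]; tauto

theorem pv_cond_third (w : String) :
    (w == "he" || w == "she" || w == "his" || w == "her" || w == "hers" || w == "they" ||
     w == "them" || w == "him" || w == "himself" || w == "herself" || w == "themselves")
      = decide (w ∈ pvTHIRD) := by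
  rw [Bool.eq_iff_iff]; simp [pvTHIRD]; tauto

-- A's loop body (zeta-reduced), characterised by the three membership counts
theorem pv_fold_A (text : List String) (f s t : Int) :
    text.foldl (fun (acc : Int × Int × Int) token =>
      (if PySem.Str.lower token == "i" || PySem.Str.lower token == "us" ||
         PySem.Str.lower token == "my" || PySem.Str.lower token == "mine" ||
         PySem.Str.lower token == "we" || PySem.Str.lower token == "our" ||
         PySem.Str.lower token == "us" || PySem.Str.lower token == "myself" ||
         PySem.Str.lower token == "ourselves" || PySem.Str.lower token == "me"
       then acc.1 + 1 else acc.1,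
       if PySem.Str.lower token == "you" || PySem.Str.lower token == "yours" ||
         PySem.Str.lower token == "your" || PySem.Str.lower token == "yourself" ||
         PySem.Str.lower token == "yourselves"
       then acc.2.1 + 1 else acc.2.1,
       if PySem.Str.lower token == "he" || PySem.Str.lower token == "she" ||
         PySem.Str.lower token == "his" || PySem.Str.lower token == "her" ||
         PySem.Str.lower token == "hers" || PySem.Str.lower token == "they" ||
         PySem.Str.lower token == "them" || PySem.Str.lower token == "him" ||
         PySem.Str.lower token == "himself" || PySem.Str.lower token == "herself" ||
         PySem.Str.lower token == "themselves"
       then acc.2.2 + 1 else acc.2.2)) (f, s, t)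
    = (f + pvN pvFIRST text, s + pvN pvSECOND text, t + pvN pvTHIRD text) := by
  induction text generalizing f s t with
  | nil => simp [pvN]
  | cons x xs ih =>
    simp only [List.foldl_cons]
    rw [ih]
    simp only [pv_cond_first (PySem.Str.lower x), pv_cond_second (PySem.Str.lower x),
      pv_cond_third (PySem.Str.lower x), pvN, List.map_cons, List.countP_cons,
      Prod.mk.injEq]
    refine ⟨?_, ?_, ?_⟩ <;> split_ifs <;> push_cast <;> ring

theorem pv_A_eq (text : List String) :
    person_count text = [pvN pvFIRST text, pvN pvSECOND text, pvN pvTHIRD text] := by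
  unfold person_count
  dsimp only
  rw [pv_fold_A]
  simp

theorem pv_sum_map_add (G : List String) (f g : String → Int) :
    (G.map (fun w => f w + g w)).sum = (G.map f).sum + (G.map g).sum := by
  induction G with
  | nil => simp
  | cons a G ih => simp only [List.map_cons, List.sum_cons, ih]; ring

theorem pv_indicator_sum (x : String) (G : List String) (hG : G.Nodup) :
    (G.map (fun w => if w = x then (1 : Int) else 0)).sum = if x ∈ G then 1 else 0 := by
  induction G with
  | nil => simp
  | cons g G ih =>
    obtain ⟨hg, hG'⟩ := List.nodup_cons.mp hG
    by_cases hxg : x = g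
    · subst hxg
      have hzero : (G.map (fun w => if w = x then (1 : Int) else 0)).sum = 0 := by
        apply List.sum_eq_zero
        intro y hy
        simp only [List.mem_map] at hy
        obtain ⟨w, hw, rfl⟩ := hy
        rw [if_neg]
        rintro rfl
        exact hg hw
      simp [hzero]
    · simp only [List.map_cons, List.sum_cons, ih hG', List.mem_cons]
      by_cases hx : x ∈ G <;> simp [hx, hxg] <;> exact Ne.symm hxg

-- sum of per-word counts over a duplicate-free list G = count of elements lying in G
theorem pv_sum_counts (G : List String) (hG : G.Nodup) (L : List String) :
    (G.map (fun w => (L.count w : Int))).sum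
      = ((L.countP (fun w => decide (w ∈ G)) : Nat) : Int) := by
  induction L with
  | nil => simp
  | cons x L ih =>
    have hmap : G.map (fun w => ((x :: L).count w : Int))
        = G.map (fun w => (L.count w : Int) + if w = x then (1 : Int) else 0) := by
      apply List.map_congr_left
      intro w _
      rw [List.count_cons]
      by_cases h : w = x <;> simp [h] <;> exact fun hh => h hh.symm
    rw [hmap, pv_sum_map_add, ih, pv_indicator_sum x G hG, List.countP_cons]
    by_cases h : x ∈ G <;> simp [h]

-- the frequency dict of B counts lowered tokens
theorem pv_freq : ∀ (text : List String) (d : PySem.Dict String Int) (w : String),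
    (text.foldl (fun (d : PySem.Dict String Int) token =>
        d.insert (PySem.Str.lower token) (d.getD (PySem.Str.lower token) 0 + 1)) d).getD w 0
      = d.getD w 0 + ((text.map PySem.Str.lower).count w : Int)
  | [], d, w => by simp
  | x :: xs, d, w => by
    simp only [List.foldl_cons, List.map_cons]
    rw [pv_freq xs]
    rw [PySem.Dict.getD_insert, List.count_cons]
    by_cases h : w = PySem.Str.lower x
    · rw [if_pos h, if_pos (beq_iff_eq.mpr h.symm), h]
      push_cast
      ring
    · rw [if_neg h, if_neg (by simpa using Ne.symm h)]
      push_cast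
      ring

theorem pv_alt_eq (text : List String) :
    person_count_alt text = [pvN pvFIRST text, pvN pvSECOND text, pvN pvTHIRD text] := by
  unfold person_count_alt
  dsimp only
  simp only [List.map_cons, List.map_nil]
  have hfreq : ∀ G : List String, G.Nodup →
      (G.map (fun w => (text.foldl (fun (d : PySem.Dict String Int) token =>
          d.insert (PySem.Str.lower token) (d.getD (PySem.Str.lower token) 0 + 1))
          PySem.Dict.empty).getD w 0)).sum = pvN G text := by
    intro G hG
    have hmap : (G.map (fun w => (text.foldl (fun (d : PySem.Dict String Int) token =>
          d.insert (PySem.Str.lower token) (d.getD (PySem.Str.lower token) 0 + 1))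
          PySem.Dict.empty).getD w 0))
        = G.map (fun w => ((text.map PySem.Str.lower).count w : Int)) := by
      apply List.map_congr_left
      intro w _
      rw [pv_freq text PySem.Dict.empty w]
      simp
    rw [hmap, pv_sum_counts G hG, pvN]
  rw [hfreq pvFIRST (by decide), hfreq pvSECOND (by decide), hfreq pvTHIRD (by decide)]

-- ===== VERDICT (by name: the statement is the Claim_ definition above) =====
theorem person_count_spec : Claim_equal_person_count := by
  intro text _
  unfold Spec_person_count
  rw [pv_A_eq, pv_alt_eq]
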